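-- pv_equiv track=rewrite | github.com/mkretsch327/advent_of_code_2021 | src/puzzle21.py | elem_update
-- ===== SOURCE A (Python) =====
-- from itertools import product
--
-- def mod_sum(x,y):
--     v = (x+y)%10
--     if v == 0:
--         v+=10
--     return v
--
-- def elem_update(x,y):
--     return_dict = {}
--     for e in product(x.items(),y):
--         k, v = mod_sum(e[0][0],e[1]), e[0][1]
--         if k in return_dict:
--             return_dict[k]+=v
--         else:
--             return_dict[k]=v
--     return return_dict
-- ===== SOURCE B (Python) =====
-- def elem_update(x, y):
--     # Collapse y into counts per residue class mod 10, then aggregate per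
--     # distinct residue instead of enumerating every (item, element) pair.
--     counts = {}
--     for e in y:
--         r = e % 10
--         counts[r] = counts.get(r, 0) + 1
--     out = {}
--     for k0, v0 in x.items():
--         for r, c in counts.items():
--             m = (k0 + r) % 10
--             k = 10 if m == 0 else m
--             if k in out:
--                 out[k] += v0 * c
--             else:
--                 out[k] = v0 * c
--     return out
-- ===== Notes on version B (the rewrite author's own statement) =====
-- stated objective: faster
-- what changed: B first collapses y into a counter of residues mod 10 (at most 10 distinct keys) and then aggregates v0*count per distinct residue, instead of enumerating the full |x|*|y| cartesian product pair by pair.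
import Mathlib
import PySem

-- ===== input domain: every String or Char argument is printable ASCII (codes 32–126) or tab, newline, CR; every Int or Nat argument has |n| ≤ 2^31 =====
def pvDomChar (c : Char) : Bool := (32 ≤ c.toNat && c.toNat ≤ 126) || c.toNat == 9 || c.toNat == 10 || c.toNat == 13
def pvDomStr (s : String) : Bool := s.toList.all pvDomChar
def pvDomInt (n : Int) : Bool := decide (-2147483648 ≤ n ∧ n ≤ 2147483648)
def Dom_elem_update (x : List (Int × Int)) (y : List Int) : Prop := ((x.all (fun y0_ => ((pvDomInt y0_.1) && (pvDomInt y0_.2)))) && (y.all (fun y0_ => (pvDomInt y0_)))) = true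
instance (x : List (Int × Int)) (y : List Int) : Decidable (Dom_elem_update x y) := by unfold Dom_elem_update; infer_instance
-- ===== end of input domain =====

-- B replaces A's full |x|·|y| pair enumeration by a residue-mod-10 counter over y
-- followed by one aggregation pass per distinct residue (objective: faster).

-- ===== PORT A =====
-- def mod_sum(x,y): v=(x+y)%10; if v==0: v+=10; return v
def pvModSum (a b : Int) : Int :=
  let v := PySem.Int.mod (a + b) 10
  if v = 0 then v + 10 else v

-- for e in product(x.items(), y): k,v = mod_sum(e[0][0],e[1]), e[0][1];
--   if k in return_dict: return_dict[k]+=v else: return_dict[k]=v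
-- (return_dict[k] += v is PySem.Dict.modify k 0 (· + v): lookup-then-store at k)
def elem_update (x : List (Int × Int)) (y : List Int) : List (Int × Int) :=
  let pairs := x.flatMap (fun kv => y.map (fun e => (kv, e)))
  (pairs.foldl
      (fun d (e : (Int × Int) × Int) =>
        let k := pvModSum e.1.1 e.2
        let v := e.1.2
        if d.contains k then d.modify k 0 (fun w => w + v) else d.insert k v)
      (PySem.Dict.empty : PySem.Dict Int Int)).items

-- ===== PORT B =====
-- counts[r] = counts.get(r, 0) + 1 over residues r = e % 10; then for each
-- (k0, v0) in x and (r, c) in counts: out key (k0+r)%10 (10 if 0) += v0*c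
def elem_update_alt (x : List (Int × Int)) (y : List Int) : List (Int × Int) :=
  let counts := y.foldl
      (fun d e =>
        d.insert (PySem.Int.mod e 10) (d.getD (PySem.Int.mod e 10) 0 + 1))
      (PySem.Dict.empty : PySem.Dict Int Int)
  (x.foldl
      (fun out kv =>
        counts.items.foldl
          (fun out (rc : Int × Int) =>
            let m := PySem.Int.mod (kv.1 + rc.1) 10
            let k := if m = 0 then 10 else m
            if out.contains k then out.modify k 0 (fun w => w + kv.2 * rc.2)
            else out.insert k (kv.2 * rc.2))
          out)
      (PySem.Dict.empty : PySem.Dict Int Int)).items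

-- ===== PRECONDITION & SPEC =====
def Spec_elem_update (x : List (Int × Int)) (y : List Int) (out : List (Int × Int)) : Prop := out = elem_update_alt x y
instance (x : List (Int × Int)) (y : List Int) (out : List (Int × Int)) : Decidable (Spec_elem_update x y out) := by unfold Spec_elem_update; infer_instance

-- ===== CLAIM (what is proved, stated in full; the proofs are below) =====
def Claim_equal_elem_update : Prop := ∀ (x : List (Int × Int)) (y : List Int), Dom_elem_update x y → Spec_elem_update x y (elem_update x y)

-- ===== LEMMAS AND PROOFS =====

-- the key both programs store contributions under, as a function of the residue r = e % 10
def pvKey (k0 r : Int) : Int :=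
  if PySem.Int.mod (k0 + r) 10 = 0 then 10 else PySem.Int.mod (k0 + r) 10

theorem pvModSum_eq_key (k0 e : Int) : pvModSum k0 e = pvKey k0 (PySem.Int.mod e 10) := by
  have h10 : (0 : Int) < 10 := by norm_num
  have hcong : PySem.Int.mod (k0 + e) 10 = PySem.Int.mod (k0 + PySem.Int.mod e 10) 10 := by
    rw [PySem.Int.mod_eq_emod_of_pos h10, PySem.Int.mod_eq_emod_of_pos h10,
        PySem.Int.mod_eq_emod_of_pos h10]
    conv_lhs => rw [Int.add_emod]
    conv_rhs => rw [Int.add_emod]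
    rw [Int.emod_emod_of_dvd _ (by norm_num)]
  simp only [pvModSum, pvKey, hcong]
  split_ifs with h
  · omega
  · rfl

-- the if-contains-then-add-else-insert step is exactly Dict.modify with default 0
theorem pvStep_eq (d : PySem.Dict Int Int) (k v : Int) :
    (if d.contains k then d.modify k 0 (fun w => w + v) else d.insert k v)
      = d.modify k 0 (fun w => w + v) := by
  by_cases h : d.contains k = true
  · simp [h]
  · have h' : d.contains k = false := by simpa using h
    simp only [h', Bool.false_eq_true, if_false, PySem.Dict.modify,
      PySem.Dict.getD_of_not_contains d 0 h', zero_add]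

theorem pvModify_modify_self (d : PySem.Dict Int Int) (k : Int) (f g : Int → Int) :
    (d.modify k 0 f).modify k 0 g = d.modify k 0 (fun w => g (f w)) := by
  simp only [PySem.Dict.modify, PySem.Dict.getD_insert_self, PySem.Dict.insert_insert_self]

theorem pvNodup_modify (d : PySem.Dict Int Int) (k : Int) (f : Int → Int)
    (h : d.keys.Nodup) : (d.modify k 0 f).keys.Nodup :=
  PySem.Dict.nodup_keys_insert d k _ h

theorem pvInsert_getD_self (d : PySem.Dict Int Int) (k : Int)
    (hc : d.contains k = true) (hnd : d.keys.Nodup) :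
    d.insert k (d.getD k 0) = d := by
  apply PySem.Dict.ext
  rw [PySem.Dict.items_insert_of_contains d _ hc]
  conv_rhs => rw [← List.map_id d.items]
  apply List.map_congr_left
  intro p hp
  obtain ⟨p1, p2⟩ := p
  by_cases hpk : p1 = k
  · subst hpk
    have : d.getD p1 0 = p2 := PySem.Dict.getD_of_mem_items d hp hnd 0
    simp [this]
  · simp [hpk]

theorem pvModify_of_contains_eq_self (d : PySem.Dict Int Int) (k : Int)
    (hc : d.contains k = true) (hnd : d.keys.Nodup) :
    d.modify k 0 (fun w => w + 0) = d := by
  simp only [PySem.Dict.modify, add_zero]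
  exact pvInsert_getD_self d k hc hnd

theorem pvInsert_insert_comm (d : PySem.Dict Int Int) (k k' vk vk' : Int)
    (hne : k' ≠ k) (hk : d.contains k = true) :
    (d.insert k vk).insert k' vk' = (d.insert k' vk').insert k vk := by
  by_cases hk' : d.contains k' = true
  · apply PySem.Dict.ext
    have c1 : (d.insert k vk).contains k' = true := by
      rw [PySem.Dict.contains_insert]; simp [hk']
    have c2 : (d.insert k' vk').contains k = true := by
      rw [PySem.Dict.contains_insert]; simp [hk]
    rw [PySem.Dict.items_insert_of_contains _ _ c1,
        PySem.Dict.items_insert_of_contains d _ hk,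
        PySem.Dict.items_insert_of_contains _ _ c2,
        PySem.Dict.items_insert_of_contains d _ hk',
        List.map_map, List.map_map]
    apply List.map_congr_left
    intro p _
    by_cases h1 : p.1 = k
    · simp [Function.comp, h1, Ne.symm hne]
    · by_cases h2 : p.1 = k'
      · simp [Function.comp, h2, hne]
      · simp [Function.comp, h1, h2]
  · have hk'f : d.contains k' = false := by simpa using hk'
    apply PySem.Dict.ext
    have c1 : (d.insert k vk).contains k' = false := by
      rw [PySem.Dict.contains_insert]; simp [hk'f, hne]
    have c2 : (d.insert k' vk').contains k = true := by
      rw [PySem.Dict.contains_insert]; simp [hk]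
    rw [PySem.Dict.items_insert_of_not_contains _ _ c1,
        PySem.Dict.items_insert_of_contains d _ hk,
        PySem.Dict.items_insert_of_contains _ _ c2,
        PySem.Dict.items_insert_of_not_contains d _ hk'f,
        List.map_append]
    simp only [List.map_cons, List.map_nil]
    have : ((k' : Int) == k) = false := by simp [hne]
    simp [this]

theorem pvModify_add_comm (d : PySem.Dict Int Int) (k k' x y : Int)
    (h : d.contains k = true) :
    (d.modify k 0 (fun w => w + x)).modify k' 0 (fun w => w + y)
      = (d.modify k' 0 (fun w => w + y)).modify k 0 (fun w => w + x) := by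
  by_cases hkk : k' = k
  · subst hkk
    rw [pvModify_modify_self, pvModify_modify_self]
    congr 1; funext w; ring
  · have e1 : (d.modify k 0 (fun w => w + x)).modify k' 0 (fun w => w + y)
        = (d.insert k (d.getD k 0 + x)).insert k' (d.getD k' 0 + y) := by
      simp only [PySem.Dict.modify]
      rw [PySem.Dict.getD_insert_of_ne d _ 0 hkk]
    have e2 : (d.modify k' 0 (fun w => w + y)).modify k 0 (fun w => w + x)
        = (d.insert k' (d.getD k' 0 + y)).insert k (d.getD k 0 + x) := by
      simp only [PySem.Dict.modify]
      rw [PySem.Dict.getD_insert_of_ne d _ 0 (Ne.symm hkk)]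
    rw [e1, e2, pvInsert_insert_comm d k k' _ _ hkk h]

-- first-occurrence dedup commutes with filter
theorem pvOfList_filter (q : Int → Bool) :
    ∀ (t : List Int), PySem.Set.ofList (t.filter q) = (PySem.Set.ofList t).filter q := by
  intro t
  induction t with
  | nil => simp
  | cons b t ih =>
    by_cases hb : q b = true
    · rw [List.filter_cons_of_pos hb, PySem.Set.ofList_cons, PySem.Set.ofList_cons]
      show b :: (PySem.Set.ofList (t.filter q)).filter (fun y => !(y == b))
          = ((b :: (PySem.Set.ofList t).filter (fun y => !(y == b))).filter q)
      rw [List.filter_cons_of_pos hb, ih, List.filter_filter, List.filter_filter]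
      congr 1
      apply List.filter_congr
      intro a _
      rw [Bool.and_comm]
    · have hbf : q b = false := by simpa using hb
      rw [List.filter_cons_of_neg (by simp [hbf]), PySem.Set.ofList_cons]
      show PySem.Set.ofList (t.filter q)
          = (b :: (PySem.Set.ofList t).filter (fun y => !(y == b))).filter q
      rw [List.filter_cons_of_neg (by simp [hbf]), ih, List.filter_filter]
      apply List.filter_congr
      intro a _
      by_cases hab : a = b
      · simp [hab, hbf]
      · simp [hab]

theorem pvOfList_cons_filter (a : Int) (t : List Int) :
    PySem.Set.ofList (a :: t) = a :: PySem.Set.ofList (t.filter (fun b => !(b == a))) := by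
  rw [PySem.Set.ofList_cons, pvOfList_filter]
  rfl

-- an already-present key's later additions can be pulled to the front of the loop
theorem pvPull (g : Int → Int) (v a : Int) :
    ∀ (t : List Int) (d : PySem.Dict Int Int), d.contains (g a) = true → d.keys.Nodup →
      t.foldl (fun d r => d.modify (g r) 0 (fun w => w + v)) d
        = (t.filter (fun b => !(b == a))).foldl (fun d r => d.modify (g r) 0 (fun w => w + v))
            (d.modify (g a) 0 (fun w => w + v * (t.count a : Int))) := by
  intro t
  induction t with
  | nil =>
    intro d hc hnd
    simp only [List.foldl_nil, List.filter_nil, List.count_nil, Nat.cast_zero, mul_zero]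
    exact (pvModify_of_contains_eq_self d (g a) hc hnd).symm
  | cons b t ih =>
    intro d hc hnd
    by_cases hba : b = a
    · subst hba
      rw [List.foldl_cons, List.filter_cons_of_neg (by simp),
          ih _ (by rw [PySem.Dict.contains_modify]; simp) (pvNodup_modify d _ _ hnd),
          pvModify_modify_self]
      congr 2
      funext w
      rw [List.count_cons_self]
      push_cast
      ring
    · rw [List.foldl_cons, List.filter_cons_of_pos (by simp [hba]),
          ih _ (by rw [PySem.Dict.contains_modify]; simp [hc]) (pvNodup_modify d _ _ hnd),
          ← pvModify_add_comm d (g a) (g b) _ _ hc, List.foldl_cons]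
      congr 3
      rw [List.count_cons_of_ne hba]

-- the whole loop over l equals one aggregated pass over the distinct elements of l
theorem pvGroup (g : Int → Int) (v : Int) :
    ∀ (n : Nat) (l : List Int), l.length ≤ n → ∀ (d : PySem.Dict Int Int), d.keys.Nodup →
      l.foldl (fun d r => d.modify (g r) 0 (fun w => w + v)) d
        = (PySem.Set.ofList l).foldl
            (fun d r => d.modify (g r) 0 (fun w => w + v * (l.count r : Int))) d := by
  intro n
  induction n with
  | zero =>
    intro l hl d _
    have : l = [] := List.length_eq_zero_iff.mp (Nat.le_zero.mp hl)
    subst this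
    simp [PySem.Set.ofList]
  | succ n ih =>
    intro l hl d hnd
    match l with
    | [] => simp [PySem.Set.ofList]
    | a :: t =>
      rw [List.foldl_cons,
          pvPull g v a t _ (by rw [PySem.Dict.contains_modify]; simp) (pvNodup_modify d _ _ hnd),
          pvModify_modify_self,
          ih (t.filter (fun b => !(b == a)))
            (le_trans (List.length_filter_le _ _) (Nat.le_of_succ_le_succ hl))
            _ (pvNodup_modify d _ _ hnd),
          pvOfList_cons_filter, List.foldl_cons]
      have hhead : (fun w => w + v + v * (t.count a : Int))
          = (fun w => w + v * (((a :: t).count a : Nat) : Int)) := by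
        funext w; rw [List.count_cons_self]; push_cast; ring
      rw [hhead]
      apply PySem.List.foldl_congr_mem
      intro acc r hr
      have hr' : r ∈ (t.filter (fun b => !(b == a))) :=
        (PySem.Set.mem_ofList _ r).mp hr
      have hra : r ≠ a := by
        have := List.of_mem_filter hr'
        simpa using this
      congr 2
      rw [List.count_filter (by simpa using hra), List.count_cons_of_ne (Ne.symm hra)]

-- per x-item: A's inner loop over y equals B's inner loop over the residue counter
theorem pvInner_eq (k0 v : Int) (y : List Int) (d : PySem.Dict Int Int) (hnd : d.keys.Nodup) :
    y.foldl (fun d e => d.modify (pvModSum k0 e) 0 (fun w => w + v)) d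
      = (PySem.Dict.counter (y.map (fun e => PySem.Int.mod e 10))).items.foldl
          (fun d (rc : Int × Int) => d.modify (pvKey k0 rc.1) 0 (fun w => w + v * rc.2)) d := by
  have hL : y.foldl (fun d e => d.modify (pvModSum k0 e) 0 (fun w => w + v)) d
      = (y.map (fun e => PySem.Int.mod e 10)).foldl
          (fun d r => d.modify (pvKey k0 r) 0 (fun w => w + v)) d := by
    rw [PySem.List.foldl_congr_mem y _
          (fun d e => d.modify (pvKey k0 (PySem.Int.mod e 10)) 0 (fun w => w + v)) d
          (by intro acc e _; rw [pvModSum_eq_key])]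
    exact (List.foldl_map (f := fun e => PySem.Int.mod e 10)
      (g := fun (d : PySem.Dict Int Int) r => d.modify (pvKey k0 r) 0 (fun w => w + v))
      (l := y) (init := d)).symm
  rw [hL, pvGroup (pvKey k0) v (y.map (fun e => PySem.Int.mod e 10)).length _ le_rfl d hnd,
      PySem.Dict.items_counter, List.foldl_map]

-- the counter B builds, via List.foldl_map and the PySem counter characterisation
theorem pvCounts_eq (y : List Int) :
    y.foldl (fun d e => d.insert (PySem.Int.mod e 10) (d.getD (PySem.Int.mod e 10) 0 + 1))
        (PySem.Dict.empty : PySem.Dict Int Int)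
      = PySem.Dict.counter (y.map (fun e => PySem.Int.mod e 10)) := by
  have h : (y.map (fun e => PySem.Int.mod e 10)).foldl
        (fun (d : PySem.Dict Int Int) r => d.insert r (d.getD r 0 + 1)) PySem.Dict.empty
      = y.foldl (fun d e => d.insert (PySem.Int.mod e 10) (d.getD (PySem.Int.mod e 10) 0 + 1))
          PySem.Dict.empty :=
    List.foldl_map (f := fun e => PySem.Int.mod e 10)
      (g := fun (d : PySem.Dict Int Int) r => d.insert r (d.getD r 0 + 1))
      (l := y) (init := PySem.Dict.empty)
  rw [← h]
  exact PySem.Dict.foldl_insert_getD_add_one_eq_counter _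

-- the two outer loops agree, threading the unique-keys invariant
theorem pvOuter (y : List Int) :
    ∀ (x : List (Int × Int)) (d : PySem.Dict Int Int), d.keys.Nodup →
      x.foldl (fun d kv =>
          y.foldl (fun d e =>
            if d.contains (pvModSum kv.1 e) then d.modify (pvModSum kv.1 e) 0 (fun w => w + kv.2)
            else d.insert (pvModSum kv.1 e) kv.2) d) d
        = x.foldl (fun d kv =>
            (PySem.Dict.counter (y.map (fun e => PySem.Int.mod e 10))).items.foldl
              (fun d (rc : Int × Int) =>
                if d.contains (pvKey kv.1 rc.1) then d.modify (pvKey kv.1 rc.1) 0 (fun w => w + kv.2 * rc.2)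
                else d.insert (pvKey kv.1 rc.1) (kv.2 * rc.2)) d) d := by
  intro x
  induction x with
  | nil => intro d _; rfl
  | cons kv t ih =>
    intro d hnd
    rw [List.foldl_cons, List.foldl_cons,
        PySem.List.foldl_congr_mem y _
          (fun d e => d.modify (pvModSum kv.1 e) 0 (fun w => w + kv.2)) d
          (by intro acc e _; exact pvStep_eq acc _ _),
        PySem.List.foldl_congr_mem (PySem.Dict.counter (y.map (fun e => PySem.Int.mod e 10))).items _
          (fun d (rc : Int × Int) => d.modify (pvKey kv.1 rc.1) 0 (fun w => w + kv.2 * rc.2)) d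
          (by intro acc rc _; exact pvStep_eq acc _ _),
        pvInner_eq kv.1 kv.2 y d hnd]
    exact ih _ (PySem.Dict.nodup_keys_foldl_modify_key _
      (fun rc : Int × Int => pvKey kv.1 rc.1) 0
      (fun _ rc => fun w => w + kv.2 * rc.2) d hnd)

-- ===== VERDICT (by name: the statement is the Claim_ definition above) =====
theorem elem_update_spec : Claim_equal_elem_update := by
  intro x y _
  unfold Spec_elem_update elem_update elem_update_alt
  simp only [List.foldl_flatMap, List.foldl_map, pvCounts_eq]
  exact congrArg PySem.Dict.items
    (pvOuter y x PySem.Dict.empty (by simp [PySem.Dict.keys_empty]))
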